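-- pv_equiv track=rewrite | github.com/ekruskal/dsp | python/q6_strings.py | not_bad
-- ===== SOURCE A (Python) =====
-- def not_bad(s):
--     counter = 0
--     for i in range(0, len(s) - 3):
--         if s[i] + s[i+1] + s[i+2] == 'not':
--             for j in range(0, len(s) - i - 2):
--                 if s[i + j] + s[i + j + 1] + s[i + j + 2] == 'bad':
--                     return s[:i] + 'good'
--                     counter += 1
--     if counter == 0:
--         return s
--     """
--     Given a string, find the first appearance of the substring 'not'
--     and 'bad'. If the 'bad' follows the 'not', replace the whole
--     'not'...'bad' substring with 'good'. Return the resulting string.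
--     So 'This dinner is not that bad!' yields: 'This dinner is
--     good!'
--
--     >>> not_bad('This movie is not so bad')
--     'This movie is good'
--     >>> not_bad('This dinner is not that bad!')
--     'This dinner is good!'
--     >>> not_bad('This tea is not hot')
--     'This tea is not hot'
--     >>> not_bad("It's bad yet not")
--     "It's bad yet not"
--     """
--     raise NotImplementedError
-- ===== SOURCE B (Python) =====
-- def not_bad(s):
--     i = s.find('not')
--     if i != -1 and 'bad' in s[i:]:
--         return s[:i] + 'good'
--     return s
-- ===== Notes on version B (the rewrite author's own statement) =====
-- stated objective: faster
-- what changed: Replaces the nested Python-level index scan (for each position, compare three characters, then rescan the whole rest for the second keyword) with two library substring searches: str.find locates the only candidate position and a single membership test on the tail slice decides the result.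
import Mathlib
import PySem

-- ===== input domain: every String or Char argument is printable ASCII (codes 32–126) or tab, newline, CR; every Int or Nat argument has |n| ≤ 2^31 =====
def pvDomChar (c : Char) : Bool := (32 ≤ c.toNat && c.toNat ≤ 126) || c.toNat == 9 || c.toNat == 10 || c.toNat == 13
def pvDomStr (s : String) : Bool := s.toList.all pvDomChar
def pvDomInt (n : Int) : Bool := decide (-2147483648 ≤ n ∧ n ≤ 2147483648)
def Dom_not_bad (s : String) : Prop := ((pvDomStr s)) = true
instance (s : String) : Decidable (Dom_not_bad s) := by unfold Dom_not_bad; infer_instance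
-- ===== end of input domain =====

-- B replaces A's nested index scan with two library substring searches (s.find('not'), 'bad' in s[i:]);
-- equal return value on every input (both programs are total; neither mutates anything).

-- ===== PORT A =====
-- s[k]+s[k+1]+s[k+2] == 'not' : the 3-char concatenation equals 'not' iff the three characters match;
-- all indices touched by A's loops are in range, so pyGet? always returns some and no IndexError is reachable.
def pvNotCheck (cs : List Char) (k : Int) : Bool :=
  (PySem.List.pyGet? cs k == some 'n') && (PySem.List.pyGet? cs (k+1) == some 'o')
    && (PySem.List.pyGet? cs (k+2) == some 't')

def pvBadCheck (cs : List Char) (k : Int) : Bool :=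
  (PySem.List.pyGet? cs k == some 'b') && (PySem.List.pyGet? cs (k+1) == some 'a')
    && (PySem.List.pyGet? cs (k+2) == some 'd')

-- A's outer loop with its early return; the inner 'for j …: if …: return' is the early-exit scan List.any.
def pvLoopA (cs : List Char) : List Int → Option (List Char)
  | [] => none
  | i :: rest =>
    if pvNotCheck cs i then
      if (PySem.List.pyRange 0 ((cs.length : Int) - i - 2)).any (fun j => pvBadCheck cs (i + j)) then
        some (PySem.List.slice cs none (some i) ++ ['g', 'o', 'o', 'd'])
      else pvLoopA cs rest
    else pvLoopA cs rest

def not_bad (s : String) : String :=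
  match pvLoopA s.toList (PySem.List.pyRange 0 ((s.toList.length : Int) - 3)) with
  | some r => String.ofList r
  | none => s    -- counter is always 0 when the loop falls through

-- ===== PORT B =====
def not_bad_alt (s : String) : String :=
  let cs := s.toList
  let i := PySem.Chars.find cs ['n', 'o', 't']
  if i ≠ -1 ∧ PySem.Chars.isIn ['b', 'a', 'd'] (PySem.List.slice cs (some i) none) = true then
    String.ofList (PySem.List.slice cs none (some i) ++ ['g', 'o', 'o', 'd'])
  else s

-- ===== PRECONDITION & SPEC =====
def Spec_not_bad (s : String) (out : String) : Prop := out = not_bad_alt s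
instance (s : String) (out : String) : Decidable (Spec_not_bad s out) := by unfold Spec_not_bad; infer_instance

-- ===== CLAIM (what is proved, stated in full; the proofs are below) =====
def Claim_equal_not_bad : Prop := ∀ (s : String), Dom_not_bad s → Spec_not_bad s (not_bad s)

-- ===== LEMMAS AND PROOFS =====

lemma pvPrefix3_iff (a b c : Char) (l : List Char) :
    [a, b, c] <+: l ↔ l[0]? = some a ∧ l[1]? = some b ∧ l[2]? = some c := by
  constructor
  · rintro ⟨t, rfl⟩; simp
  · rcases l with _ | ⟨x, _ | ⟨y, _ | ⟨z, t⟩⟩⟩ <;>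
      simp_all [List.cons_prefix_cons, List.nil_prefix]

lemma pvNotCheck_iff (cs : List Char) (p : Nat) :
    pvNotCheck cs (p : Int) = true ↔ ['n', 'o', 't'] <+: cs.drop p := by
  have h1 : (p : Int) + 1 = ((p + 1 : Nat) : Int) := by push_cast; ring
  have h2 : (p : Int) + 2 = ((p + 2 : Nat) : Int) := by push_cast; ring
  rw [pvNotCheck]
  simp only [Bool.and_eq_true, beq_iff_eq, h1, h2, PySem.List.pyGet?_natCast]
  rw [pvPrefix3_iff]
  simp [List.getElem?_drop, and_assoc]

lemma pvBadCheck_iff (cs : List Char) (p : Nat) :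
    pvBadCheck cs (p : Int) = true ↔ ['b', 'a', 'd'] <+: cs.drop p := by
  have h1 : (p : Int) + 1 = ((p + 1 : Nat) : Int) := by push_cast; ring
  have h2 : (p : Int) + 2 = ((p + 2 : Nat) : Int) := by push_cast; ring
  rw [pvBadCheck]
  simp only [Bool.and_eq_true, beq_iff_eq, h1, h2, PySem.List.pyGet?_natCast]
  rw [pvPrefix3_iff]
  simp [List.getElem?_drop, and_assoc]

lemma pvLoopA_skip (cs : List Char) (l1 l2 : List Int)
    (h : ∀ i ∈ l1, pvNotCheck cs i = false ∨
      (PySem.List.pyRange 0 ((cs.length : Int) - i - 2)).any (fun j => pvBadCheck cs (i + j)) = false) :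
    pvLoopA cs (l1 ++ l2) = pvLoopA cs l2 := by
  induction l1 with
  | nil => rfl
  | cons i rest ih =>
    have hi := h i (by simp)
    have hrest : ∀ x ∈ rest, _ := fun x hx => h x (by simp [hx])
    rcases hi with hi | hi
    · simpa [pvLoopA, hi] using ih hrest
    · rcases hn : pvNotCheck cs i with _ | _
      · simpa [pvLoopA, hn] using ih hrest
      · simpa [pvLoopA, hn, hi] using ih hrest

lemma pvInnerAny_iff (cs : List Char) (f : Nat) :
    ((PySem.List.pyRange 0 ((cs.length : Int) - (f : Int) - 2)).any
        (fun j => pvBadCheck cs ((f : Int) + j)) = true)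
      ↔ ∃ p : Nat, f ≤ p ∧ ['b', 'a', 'd'] <+: cs.drop p := by
  rw [List.any_eq_true]
  constructor
  · rintro ⟨j, hj, hb⟩
    rw [PySem.List.mem_pyRange_one] at hj
    have hcast : (f : Int) + j = ((((f : Int) + j).toNat : Nat) : Int) := by omega
    refine ⟨((f : Int) + j).toNat, by omega, ?_⟩
    rw [hcast, pvBadCheck_iff] at hb
    exact hb
  · rintro ⟨p, hfp, hpre⟩
    have hlen : p + 3 ≤ cs.length := by
      have := hpre.length_le
      simp [List.length_drop] at this
      omega
    refine ⟨(p : Int) - (f : Int), ?_, ?_⟩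
    · rw [PySem.List.mem_pyRange_one]; omega
    · have hcast : (f : Int) + ((p : Int) - (f : Int)) = ((p : Nat) : Int) := by ring
      rw [hcast, pvBadCheck_iff]
      exact hpre

lemma pvIsIn_of_prefix_drop (cs sub : List Char) (k : Nat) (h : sub <+: cs.drop k) :
    PySem.Chars.isIn sub cs = true := by
  rw [← PySem.Chars.exists_prefix_drop_iff_isIn]
  exact ⟨k, h⟩

theorem not_bad_spec : Claim_equal_not_bad := by
  intro s _
  show not_bad s = not_bad_alt s
  have halt : not_bad_alt s =
      if PySem.Chars.find s.toList ['n', 'o', 't'] ≠ -1 ∧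
          PySem.Chars.isIn ['b', 'a', 'd']
            (PySem.List.slice s.toList (some (PySem.Chars.find s.toList ['n', 'o', 't'])) none) = true then
        String.ofList (PySem.List.slice s.toList none
          (some (PySem.Chars.find s.toList ['n', 'o', 't'])) ++ ['g', 'o', 'o', 'd'])
      else s := rfl
  by_cases hF : PySem.Chars.find s.toList ['n', 'o', 't'] = -1
  · -- no 'not' anywhere: both sides return s
    have hninf : ¬ ['n', 'o', 't'] <:+: s.toList :=
      (PySem.Chars.find_eq_neg_one_iff s.toList _).mp hF
    have hloop : pvLoopA s.toList (PySem.List.pyRange 0 ((s.toList.length : Int) - 3)) = none := by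
      have := pvLoopA_skip s.toList (PySem.List.pyRange 0 ((s.toList.length : Int) - 3)) []
        (fun i hi => by
          left
          rcases hn : pvNotCheck s.toList i with _ | _
          · rfl
          · exfalso
            rw [PySem.List.mem_pyRange_one] at hi
            have hi0 : i = ((i.toNat : Nat) : Int) := by omega
            rw [hi0, pvNotCheck_iff] at hn
            exact hninf ((PySem.Chars.isIn_iff_infix _ _).mp (pvIsIn_of_prefix_drop _ _ _ hn)))
      simpa using this
    rw [not_bad, hloop, halt, if_neg (by simp [hF])]
  · have hF0 : 0 ≤ PySem.Chars.find s.toList ['n', 'o', 't'] := by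
      have := PySem.Chars.neg_one_le_find s.toList ['n', 'o', 't']
      omega
    have hFf : PySem.Chars.find s.toList ['n', 'o', 't'] =
        (((PySem.Chars.find s.toList ['n', 'o', 't']).toNat : Nat) : Int) := by omega
    obtain ⟨hpre, hmin⟩ :=
      PySem.Chars.find_spec (s := s.toList) (sub := ['n', 'o', 't']) hF0
    by_cases hc : PySem.Chars.isIn ['b', 'a', 'd']
        (PySem.List.slice s.toList (some (PySem.Chars.find s.toList ['n', 'o', 't'])) none) = true
    · -- a 'bad' follows the first 'not': both return s[:i] + 'good'
      have hc2 := hc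
      rw [PySem.List.slice_from s.toList hF0] at hc2
      obtain ⟨p', hp'⟩ := (PySem.Chars.exists_prefix_drop_iff_isIn _ _).mpr hc2
      rw [List.drop_drop] at hp'
      have hll : s.toList.length = s.length := by simp
      have hplen : (PySem.Chars.find s.toList ['n', 'o', 't']).toNat + p' + 3 ≤ s.toList.length := by
        have := hp'.length_le
        simp [List.length_drop] at this
        omega
      have hpne : p' ≠ 0 := by
        intro he
        have h1 := (pvPrefix3_iff _ _ _ _).mp hp'
        have h2 := (pvPrefix3_iff _ _ _ _).mp hpre
        rw [he, Nat.add_zero] at h1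
        rw [h1.1] at h2
        simp at h2
      have hf4 : PySem.Chars.find s.toList ['n', 'o', 't'] < (s.toList.length : Int) - 3 := by omega
      have hsplit : PySem.List.pyRange 0 ((s.toList.length : Int) - 3) =
          PySem.List.pyRange 0 (PySem.Chars.find s.toList ['n', 'o', 't']) ++
            PySem.List.pyRange (PySem.Chars.find s.toList ['n', 'o', 't']) ((s.toList.length : Int) - 3) :=
        PySem.List.pyRange_one_append _ _ _ hF0 (by omega)
      have hnotF : pvNotCheck s.toList (PySem.Chars.find s.toList ['n', 'o', 't']) = true := by
        rw [hFf, pvNotCheck_iff]; exact hpre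
      have hanyF : (PySem.List.pyRange 0
            ((s.toList.length : Int) - PySem.Chars.find s.toList ['n', 'o', 't'] - 2)).any
          (fun j => pvBadCheck s.toList (PySem.Chars.find s.toList ['n', 'o', 't'] + j)) = true := by
        rw [hFf]
        exact (pvInnerAny_iff s.toList _).mpr
          ⟨(PySem.Chars.find s.toList ['n', 'o', 't']).toNat + p', by omega, hp'⟩
      have hloop : pvLoopA s.toList (PySem.List.pyRange 0 ((s.toList.length : Int) - 3)) =
          some (PySem.List.slice s.toList none
            (some (PySem.Chars.find s.toList ['n', 'o', 't'])) ++ ['g', 'o', 'o', 'd']) := by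
        rw [hsplit, pvLoopA_skip s.toList _ _ (fun i hi => by
          left
          rw [PySem.List.mem_pyRange_one] at hi
          rcases hn : pvNotCheck s.toList i with _ | _
          · rfl
          · exfalso
            have hi0 : i = ((i.toNat : Nat) : Int) := by omega
            rw [hi0, pvNotCheck_iff] at hn
            exact hmin i.toNat (by omega) hn)]
        rw [PySem.List.pyRange_one_cons hf4, pvLoopA, hnotF, if_pos rfl, hanyF, if_pos rfl]
      rw [not_bad, hloop, halt, if_pos ⟨hF, hc⟩]
    · -- a 'not' but no 'bad' after it (hence none after any later 'not'): both return s
      have hc2 : ¬ PySem.Chars.isIn ['b', 'a', 'd']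
          (s.toList.drop (PySem.Chars.find s.toList ['n', 'o', 't']).toNat) = true := by
        rw [← PySem.List.slice_from s.toList hF0]; exact hc
      have hnobad : ∀ p : Nat, (PySem.Chars.find s.toList ['n', 'o', 't']).toNat ≤ p →
          ¬ ['b', 'a', 'd'] <+: s.toList.drop p := by
        intro p hfp hb
        apply hc2
        rw [← PySem.Chars.exists_prefix_drop_iff_isIn]
        refine ⟨p - (PySem.Chars.find s.toList ['n', 'o', 't']).toNat, ?_⟩
        rw [List.drop_drop]
        have he : (PySem.Chars.find s.toList ['n', 'o', 't']).toNat +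
            (p - (PySem.Chars.find s.toList ['n', 'o', 't']).toNat) = p := by omega
        rw [he]
        exact hb
      have hloop : pvLoopA s.toList (PySem.List.pyRange 0 ((s.toList.length : Int) - 3)) = none := by
        have := pvLoopA_skip s.toList (PySem.List.pyRange 0 ((s.toList.length : Int) - 3)) []
          (fun i hi => by
            rw [PySem.List.mem_pyRange_one] at hi
            have hi0 : i = ((i.toNat : Nat) : Int) := by omega
            by_cases hif : i.toNat < (PySem.Chars.find s.toList ['n', 'o', 't']).toNat
            · left
              rcases hn : pvNotCheck s.toList i with _ | _
              · rfl
              · exfalso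
                rw [hi0, pvNotCheck_iff] at hn
                exact hmin i.toNat hif hn
            · right
              rcases ha : (PySem.List.pyRange 0 ((s.toList.length : Int) - i - 2)).any
                  (fun j => pvBadCheck s.toList (i + j)) with _ | _
              · rfl
              · exfalso
                rw [hi0] at ha
                obtain ⟨p, hp1, hp2⟩ := (pvInnerAny_iff s.toList i.toNat).mp ha
                exact hnobad p (by omega) hp2)
        simpa using this
      rw [not_bad, hloop, halt, if_neg (by simp [hc])]
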